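-- pv_equiv track=rewrite | github.com/NVIDIA/TransformerEngine | transformer_engine/jax/quantize/scaling_modes.py | _apply_scale_shape_correction
-- ===== SOURCE A (Python) =====
-- def _apply_scale_shape_correction(data_shape, n_scale_blocks, scale_block_dim):
--     """Remove excess padding from the scale shape and return the shape with respect to the original data shape."""
--     if len(data_shape) > 1:
--         # handle last dim
--         assert data_shape[-1] % scale_block_dim == 0
--         last = data_shape[-1] // scale_block_dim
--         scale_shape = (last,)
--         assert n_scale_blocks % last == 0
--         n_scale_blocks //= last
--         # handle middle dim, exclude first and last
--         for mid in reversed(data_shape[1:-1]):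
--             scale_shape = (mid,) + scale_shape
--             assert n_scale_blocks % mid == 0
--             n_scale_blocks //= mid
--         scale_shape = (n_scale_blocks,) + scale_shape
--     else:
--         scale_shape = (n_scale_blocks,)
--
--     assert len(scale_shape) == len(
--         data_shape
--     ), f"scale_shape {scale_shape}, data_shape {data_shape}"
--     return scale_shape
-- ===== SOURCE B (Python) =====
-- def _apply_scale_shape_correction(data_shape, n_scale_blocks, scale_block_dim):
--     """Remove excess padding from the scale shape and return the shape with respect to the original data shape."""
--
--     def build(dims):
--         # structural recursion over data_shape[1:]: returns (product of the
--         # corrected dims, corrected tail shape)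
--         if len(dims) == 1:
--             assert dims[0] % scale_block_dim == 0
--             v = dims[0] // scale_block_dim
--             return v, (v,)
--         p, t = build(dims[1:])
--         return dims[0] * p, (dims[0],) + t
--
--     if len(data_shape) <= 1:
--         return (n_scale_blocks,)
--     p, tail = build(tuple(data_shape[1:]))
--     assert n_scale_blocks % p == 0
--     return (n_scale_blocks // p,) + tail
-- ===== Notes on version B (the rewrite author's own statement) =====
-- stated objective: alternative
-- what changed: Replaces A's reversed divide-and-prepend loop (dividing n_scale_blocks dimension by dimension) with a structural recursion over data_shape[1:] that builds the corrected tail and its product in one descent, followed by a single division n_scale_blocks // p.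
import Mathlib
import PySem

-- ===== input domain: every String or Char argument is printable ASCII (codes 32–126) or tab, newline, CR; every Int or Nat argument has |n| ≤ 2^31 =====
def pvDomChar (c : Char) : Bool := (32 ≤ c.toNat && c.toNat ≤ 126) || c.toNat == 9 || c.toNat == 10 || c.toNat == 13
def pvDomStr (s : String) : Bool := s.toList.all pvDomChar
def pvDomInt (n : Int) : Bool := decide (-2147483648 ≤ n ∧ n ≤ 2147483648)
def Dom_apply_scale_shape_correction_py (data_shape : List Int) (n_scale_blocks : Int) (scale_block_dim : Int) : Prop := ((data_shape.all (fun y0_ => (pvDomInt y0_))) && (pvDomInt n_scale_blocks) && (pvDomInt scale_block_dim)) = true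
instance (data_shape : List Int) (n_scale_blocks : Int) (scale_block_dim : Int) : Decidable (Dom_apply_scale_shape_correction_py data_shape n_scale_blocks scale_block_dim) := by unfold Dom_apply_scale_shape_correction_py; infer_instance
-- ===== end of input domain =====

-- B replaces A's reversed divide-and-prepend loop by a structural recursion over the tail dims
-- that builds the corrected tail shape together with its product, then divides once
-- (objective: alternative decomposition). Equality is proved on Pre_, exactly the inputs where
-- the Python A returns (outside it A raises AssertionError or ZeroDivisionError).

-- ===== PORT A =====
def apply_scale_shape_correction_py (data_shape : List Int) (n_scale_blocks : Int) (scale_block_dim : Int) : List Int :=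
  if data_shape.length > 1 then
    -- assert data_shape[-1] % scale_block_dim == 0  (Pre_ guarantees it; pyGet? is some on Pre_)
    let last := PySem.Int.floordiv ((PySem.List.pyGet? data_shape (-1)).getD 0) scale_block_dim
    -- scale_shape = (last,); assert n % last == 0; n //= last; reversed loop over data_shape[1:-1]
    let st := ((PySem.List.slice data_shape (some 1) (some (-1))).reverse).foldl
      (fun (st : List Int × Int) mid => (mid :: st.1, PySem.Int.floordiv st.2 mid))
      ([last], PySem.Int.floordiv n_scale_blocks last)
    st.2 :: st.1
  else
    [n_scale_blocks]

-- ===== PORT B =====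
-- Source B's inner `build`: structural recursion over the tail dims, returning
-- (product of the corrected dims, corrected tail shape); [] is unreachable from the caller.
def pvBuild (scale_block_dim : Int) : List Int → Int × List Int
  | [] => (1, [])
  | [h] =>
      let v := PySem.Int.floordiv h scale_block_dim
      (v, [v])
  | h :: h2 :: t =>
      let pt := pvBuild scale_block_dim (h2 :: t)
      (h * pt.1, h :: pt.2)

def apply_scale_shape_correction_py_alt (data_shape : List Int) (n_scale_blocks : Int) (scale_block_dim : Int) : List Int :=
  match data_shape with
  | [] => [n_scale_blocks]
  | [_] => [n_scale_blocks]
  | _ :: h2 :: t =>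
      let pt := pvBuild scale_block_dim (h2 :: t)
      PySem.Int.floordiv n_scale_blocks pt.1 :: pt.2

-- ===== PRECONDITION & SPEC =====
-- Pre_ holds exactly where the Python A returns: it excludes only the raising inputs —
-- the empty shape (final length assert fails), a zero divisor along the chain
-- (ZeroDivisionError: scale_block_dim = 0 or last = 0 or a middle dim = 0, i.e. the product = 0),
-- and non-divisible shapes (AssertionError).
def Pre_apply_scale_shape_correction_py (data_shape : List Int) (n_scale_blocks : Int) (scale_block_dim : Int) : Prop :=
  data_shape ≠ [] ∧
  (data_shape.length = 1 ∨
    (scale_block_dim ≠ 0 ∧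
     PySem.Int.mod (data_shape.getLastD 0) scale_block_dim = 0 ∧
     PySem.Int.floordiv (data_shape.getLastD 0) scale_block_dim * (data_shape.tail.dropLast).prod ≠ 0 ∧
     PySem.Int.mod n_scale_blocks
       (PySem.Int.floordiv (data_shape.getLastD 0) scale_block_dim * (data_shape.tail.dropLast).prod) = 0))
instance (data_shape : List Int) (n_scale_blocks : Int) (scale_block_dim : Int) : Decidable (Pre_apply_scale_shape_correction_py data_shape n_scale_blocks scale_block_dim) := by unfold Pre_apply_scale_shape_correction_py; infer_instance

def pvWitness_apply_scale_shape_correction_py : List Int × Int × Int := ([4, 6, 8], 24, 2)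

def Spec_apply_scale_shape_correction_py (data_shape : List Int) (n_scale_blocks : Int) (scale_block_dim : Int) (out : List Int) : Prop := out = apply_scale_shape_correction_py_alt data_shape n_scale_blocks scale_block_dim
instance (data_shape : List Int) (n_scale_blocks : Int) (scale_block_dim : Int) (out : List Int) : Decidable (Spec_apply_scale_shape_correction_py data_shape n_scale_blocks scale_block_dim out) := by unfold Spec_apply_scale_shape_correction_py; infer_instance

-- ===== CLAIM (what is proved, stated in full; the proofs are below) =====
def Claim_equal_apply_scale_shape_correction_py : Prop := ∀ (data_shape : List Int) (n_scale_blocks : Int) (scale_block_dim : Int), Dom_apply_scale_shape_correction_py data_shape n_scale_blocks scale_block_dim → Pre_apply_scale_shape_correction_py data_shape n_scale_blocks scale_block_dim → Spec_apply_scale_shape_correction_py data_shape n_scale_blocks scale_block_dim (apply_scale_shape_correction_py data_shape n_scale_blocks scale_block_dim)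

-- ===== LEMMAS AND PROOFS =====

-- B's recursion characterised: on mid ++ [y] it yields the corrected tail and its product.
theorem pvBuildSpec (s y : Int) (mid : List Int) :
    pvBuild s (mid ++ [y]) = (mid.prod * PySem.Int.floordiv y s, mid ++ [PySem.Int.floordiv y s]) := by
  induction mid with
  | nil => simp [pvBuild]
  | cons m t ih =>
    cases t with
    | nil => simp [pvBuild]
    | cons a b =>
      simp only [List.cons_append, pvBuild]
      rw [show a :: (b ++ [y]) = (a :: b) ++ [y] from rfl, ih]
      refine Prod.ext ?_ rfl
      simp only [List.prod_cons]
      ring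

-- A's loop (a foldr after List.foldl_reverse): under exact divisibility by the whole
-- product it prepends the list and divides n by the product in one go.
theorem pvDivChain (ms : List Int) (acc : List Int) (n : Int)
    (h0 : (0 : Int) ∉ ms) (hd : ms.prod ∣ n) :
    ms.foldr (fun mid (st : List Int × Int) => (mid :: st.1, PySem.Int.floordiv st.2 mid)) (acc, n)
      = (ms ++ acc, n / ms.prod) := by
  induction ms generalizing n with
  | nil => simp
  | cons m t ih =>
    have hm : m ≠ 0 := fun h => h0 (h ▸ List.mem_cons_self)
    have htne : t.prod ≠ 0 := by
      intro h
      rcases List.prod_eq_zero_iff.mp h with hz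
      exact h0 (List.mem_cons_of_mem _ hz)
    have ht : t.prod ∣ n := dvd_trans (dvd_mul_left t.prod m) (by simpa using hd)
    obtain ⟨k, hk⟩ := hd
    rw [List.prod_cons] at hk
    have h1 : n / t.prod = m * k := by
      rw [hk, show m * t.prod * k = m * k * t.prod by ring]
      exact Int.mul_ediv_cancel _ htne
    have h2 : PySem.Int.floordiv (m * k) m = k := by
      have he : PySem.Int.floordiv (m * k) m = m * k / m :=
        Int.fdiv_eq_ediv_of_dvd (Dvd.intro k rfl)
      rw [he]; exact Int.mul_ediv_cancel_left _ hm
    have h3 : n / (m * t.prod) = k := by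
      rw [hk]; exact Int.mul_ediv_cancel_left _ (mul_ne_zero hm htne)
    rw [List.foldr_cons, ih n (fun h => h0 (List.mem_cons_of_mem _ h)) ht]
    simp only [List.prod_cons, h1, h2, h3, List.cons_append]

-- the Python slice data_shape[1:-1] on a shape of rank ≥ 2.
theorem pvSliceMid (x y : Int) (mid : List Int) :
    PySem.List.slice (x :: (mid ++ [y])) (some 1) (some (-1)) = mid := by
  have h : ¬ ((mid.length : Int) + 1 < 0) := by omega
  simp [PySem.List.slice, PySem.List.clampIdx, h, List.take_left']

-- B's match on a rank-≥2 shape, without exposing mid's constructor.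
theorem pvAltCons (x : Int) (l : List Int) (n s : Int) (hne : l ≠ []) :
    apply_scale_shape_correction_py_alt (x :: l) n s
      = PySem.Int.floordiv n (pvBuild s l).1 :: (pvBuild s l).2 := by
  cases l with
  | nil => exact absurd rfl hne
  | cons a b => rfl

-- ===== VERDICT (by name: the statement is the Claim_ definition above) =====
theorem apply_scale_shape_correction_py_spec : Claim_equal_apply_scale_shape_correction_py := by
  intro d n s _ hpre
  unfold Spec_apply_scale_shape_correction_py
  obtain ⟨hne, hcase⟩ := hpre
  by_cases hl : d.length > 1
  · -- rank ≥ 2: d = x :: mid ++ [y]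
    obtain ⟨x, rest, rfl⟩ : ∃ x rest, d = x :: rest := by
      cases d with
      | nil => exact absurd rfl hne
      | cons a t => exact ⟨a, t, rfl⟩
    obtain ⟨mid, y, rfl⟩ : ∃ mid y, rest = mid ++ [y] := by
      rcases rest.eq_nil_or_concat with h | ⟨mid, y, h⟩
      · subst h; simp at hl
      · exact ⟨mid, y, by simpa using h⟩
    rcases hcase with h1 | ⟨hs, hmod, hp0, hn⟩
    · simp at h1
    have hgetD : (x :: (mid ++ [y])).getLastD 0 = y := by
      rw [show x :: (mid ++ [y]) = (x :: mid) ++ [y] from rfl, List.getLastD_concat]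
    have htl : (x :: (mid ++ [y])).tail.dropLast = mid := by
      simp
    rw [hgetD, htl] at hp0 hn
    have hget : (PySem.List.pyGet? (x :: (mid ++ [y])) (-1)).getD 0 = y := by
      rw [PySem.List.pyGet?_neg_one, show x :: (mid ++ [y]) = (x :: mid) ++ [y] from rfl,
        List.getLast?_concat]; rfl
    set last := PySem.Int.floordiv y s with hlast
    have hlne : last ≠ 0 := fun h => hp0 (by rw [h, zero_mul])
    have hmidne : mid.prod ≠ 0 := fun h => hp0 (by rw [h, mul_zero])
    have h0mid : (0 : Int) ∉ mid := fun h => hmidne (List.prod_eq_zero h)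
    have hdvd : last * mid.prod ∣ n := (PySem.Int.mod_eq_zero_iff_dvd _ _).mp hn
    obtain ⟨k, hk⟩ := hdvd
    have hn1 : PySem.Int.floordiv n last = mid.prod * k := by
      have hdl : last ∣ n := ⟨mid.prod * k, by rw [hk]; ring⟩
      rw [show PySem.Int.floordiv n last = n / last from Int.fdiv_eq_ediv_of_dvd hdl, hk,
        show last * mid.prod * k = mid.prod * k * last by ring]
      exact Int.mul_ediv_cancel _ hlne
    have hq : mid.prod * k / mid.prod = k := Int.mul_ediv_cancel_left _ hmidne
    have hfirst : PySem.Int.floordiv n (mid.prod * last) = k := by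
      rw [show PySem.Int.floordiv n (mid.prod * last) = n / (mid.prod * last) from
        Int.fdiv_eq_ediv_of_dvd ⟨k, by rw [hk]; ring⟩, show n = mid.prod * last * k by rw [hk]; ring]
      exact Int.mul_ediv_cancel_left _ (mul_ne_zero hmidne hlne)
    rw [pvAltCons x (mid ++ [y]) n s (by simp), pvBuildSpec]
    unfold apply_scale_shape_correction_py
    simp only [if_pos hl, hget, pvSliceMid, List.foldl_reverse]
    rw [hn1, pvDivChain mid [last] (mid.prod * k) h0mid ⟨k, rfl⟩, hq, hfirst]
  · -- rank ≤ 1: both ports return [n]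
    have : d = [d.headD 0] := by
      cases d with
      | nil => exact absurd rfl hne
      | cons a t => cases t with
        | nil => rfl
        | cons b u => simp at hl
    rw [this]
    rfl
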